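-- pv_equiv track=rewrite | github.com/MischaGithub/sd_be_assessment | league_rankings.py | create_league_ranking
-- ===== SOURCE A (Python) =====
-- def create_league_ranking(scores):
--     # Sort teams by score (descending) and name (ascending).
--     sorted_teams = sorted(scores.items(), key=lambda x: (-x[1], x[0]))
--     output = []
--
--     rank = 0
--     prev_score = None
--     # Assign ranks, handling ties (teams with the same score get the same rank).
--     for i, (team, score) in enumerate(sorted_teams, start=1):
--         if score != prev_score:
--             rank = i    # Update rank if the score changes.
--
--         # Format the ranking line (e.g., "1. TeamA, 3 pts").
--         output.append(f"{rank}. {team}, {score} pt{'s' if score != 1 else ''}")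
--         prev_score = score
--
--     # Join the formatted lines into a single string with newlines.
--     return "\n".join(output)
-- ===== SOURCE B (Python) =====
-- def create_league_ranking(scores):
--     items = list(scores.items())
--     lines = [
--         f"{1 + sum(1 for _, s in items if s > score)}. {team}, {score} pt{'s' if score != 1 else ''}"
--         for team, score in sorted(items, key=lambda x: (-x[1], x[0]))
--     ]
--     return "\n".join(lines)
-- ===== Notes on version B (the rewrite author's own statement) =====
-- stated objective: alternative
-- what changed: Replaces A's sequential enumerate/rank/prev-score state machine with a stateless closed-form rank: each team's rank is computed independently as 1 + the number of teams with a strictly higher score, so no rank/prev state is threaded through the emission pass.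
import Mathlib
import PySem

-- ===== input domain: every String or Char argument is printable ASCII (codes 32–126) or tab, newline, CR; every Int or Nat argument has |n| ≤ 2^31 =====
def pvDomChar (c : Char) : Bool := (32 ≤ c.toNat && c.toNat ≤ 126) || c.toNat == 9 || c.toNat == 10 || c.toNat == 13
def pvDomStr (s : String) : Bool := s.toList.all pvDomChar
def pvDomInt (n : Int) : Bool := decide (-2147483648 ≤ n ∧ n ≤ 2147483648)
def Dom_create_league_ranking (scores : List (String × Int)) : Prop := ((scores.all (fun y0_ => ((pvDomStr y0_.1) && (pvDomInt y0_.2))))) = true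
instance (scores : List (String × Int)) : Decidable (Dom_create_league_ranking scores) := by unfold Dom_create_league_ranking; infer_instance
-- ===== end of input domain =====

-- B replaces A's sequential enumerate/rank/prev-score state machine by a stateless
-- closed-form rank: each team's rank is 1 + the number of teams with a strictly
-- higher score, computed independently per line (alternative decomposition).

-- ===== PORT A =====
-- shared formatting helper: the f-string "{rank}. {team}, {score} pt{'s' if score != 1 else ''}"
-- (identical in both Pythons)
def pvLine (rank : Int) (team : String) (score : Int) : String :=
  PySem.Int.toStr rank ++ ". " ++ team ++ ", " ++ PySem.Int.toStr score ++
    " pt" ++ (if score ≠ 1 then "s" else "")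

def create_league_ranking (scores : List (String × Int)) : String :=
  let sorted_teams := PySem.List.sorted2 scores (fun x => -x.2) (fun x => x.1)
  -- for i, (team, score) in enumerate(sorted_teams, start=1): state = (i, rank, prev_score, output)
  let st := sorted_teams.foldl
    (fun (st : Int × Int × Option Int × List String) ts =>
      let rank := if some ts.2 ≠ st.2.2.1 then st.1 else st.2.1
      (st.1 + 1, rank, some ts.2, st.2.2.2 ++ [pvLine rank ts.1 ts.2]))
    (1, 0, none, [])
  PySem.Str.join "\n" st.2.2.2

-- ===== PORT B =====
-- sum(1 for _, s in items if s > score): number of entries of items with score strictly above s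
def pvCg (items : List (String × Int)) (s : Int) : Int :=
  ((items.filter (fun x => decide (s < x.2))).length : Int)

def create_league_ranking_alt (scores : List (String × Int)) : String :=
  let items := scores
  let lines := (PySem.List.sorted2 items (fun x => -x.2) (fun x => x.1)).map
    (fun ts => pvLine (1 + pvCg items ts.2) ts.1 ts.2)
  PySem.Str.join "\n" lines

-- ===== PRECONDITION & SPEC =====
-- Pre_ excludes association lists with duplicate team names: a Python dict cannot hold
-- them, so their behaviour under the dict argument is not defined by A.
def Pre_create_league_ranking (scores : List (String × Int)) : Prop :=
  (scores.map Prod.fst).Nodup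
instance (scores : List (String × Int)) : Decidable (Pre_create_league_ranking scores) := by
  unfold Pre_create_league_ranking; infer_instance

def pvWitness_create_league_ranking : (List (String × Int)) := [("Lions", 3), ("Snakes", 1)]

def Spec_create_league_ranking (scores : List (String × Int)) (out : String) : Prop := out = create_league_ranking_alt scores
instance (scores : List (String × Int)) (out : String) : Decidable (Spec_create_league_ranking scores out) := by unfold Spec_create_league_ranking; infer_instance

-- ===== CLAIM (what is proved, stated in full; the proofs are below) =====
def Claim_equal_create_league_ranking : Prop := ∀ (scores : List (String × Int)), Dom_create_league_ranking scores → Pre_create_league_ranking scores → Spec_create_league_ranking scores (create_league_ranking scores)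

-- ===== LEMMAS AND PROOFS =====

-- A's loop, written as structural recursion producing the list of lines
def pvLinA : List (String × Int) → Int → Int → Option Int → List String
  | [], _, _, _ => []
  | (t, s) :: xs, i, r, prev =>
    let rank := if some s ≠ prev then i else r
    pvLine rank t s :: pvLinA xs (i + 1) rank (some s)

theorem pvFoldA (l : List (String × Int)) :
    ∀ (i r : Int) (prev : Option Int) (acc : List String),
    (l.foldl (fun (st : Int × Int × Option Int × List String) ts =>
        let rank := if some ts.2 ≠ st.2.2.1 then st.1 else st.2.1
        (st.1 + 1, rank, some ts.2, st.2.2.2 ++ [pvLine rank ts.1 ts.2]))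
      (i, r, prev, acc)).2.2.2 = acc ++ pvLinA l i r prev := by
  induction l with
  | nil => intro i r prev acc; simp [pvLinA]
  | cons x xs ih =>
    intro i r prev acc
    obtain ⟨t, s⟩ := x
    simp only [List.foldl_cons, pvLinA, ih]
    by_cases h : some s ≠ prev <;> simp [h]

-- inserting with a `before` test compatible with a transitive relation R preserves Pairwise R
theorem pvInsertByPairwise {α : Type} (R : α → α → Prop) (before : α → α → Bool)
    (htr : ∀ a b c, R a b → R b c → R a c)
    (h1 : ∀ a b, before a b = true → R a b)
    (h2 : ∀ a b, before a b = false → R b a)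
    (x : α) : ∀ l : List α, l.Pairwise R → (PySem.List.insertBy before x l).Pairwise R := by
  intro l
  induction l with
  | nil => intro _; simp [PySem.List.insertBy]
  | cons y ys ih =>
    intro hp
    rw [List.pairwise_cons] at hp
    obtain ⟨hy, hys⟩ := hp
    by_cases hb : before x y = true
    · simp only [PySem.List.insertBy, hb, if_pos]
      rw [List.pairwise_cons, List.pairwise_cons]
      exact ⟨fun z hz => by
          rcases List.mem_cons.mp hz with h | h
          · exact h ▸ h1 _ _ hb
          · exact htr _ _ _ (h1 _ _ hb) (hy z h), hy, hys⟩
    · have hb' : before x y = false := by simpa using hb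
      simp only [PySem.List.insertBy, hb', Bool.false_eq_true, if_false]
      rw [List.pairwise_cons]
      refine ⟨fun z hz => ?_, ih hys⟩
      rcases (PySem.List.mem_insertBy before x z ys).mp hz with h | h
      · exact h ▸ h2 _ _ hb'
      · exact hy z h

-- the sorted list of A/B has non-increasing scores
theorem pvSortedPairwise (xs : List (String × Int)) :
    (PySem.List.sorted2 xs (fun x => -x.2) (fun x => x.1)).Pairwise
      (fun a b : String × Int => b.2 ≤ a.2) := by
  have key : ∀ (l : List (String × Int)) (acc : List (String × Int)),
      acc.Pairwise (fun a b : String × Int => b.2 ≤ a.2) →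
      (l.foldl (fun acc x =>
        PySem.List.insertBy
          (fun a b : String × Int =>
            decide (-a.2 < -b.2) || (!decide (-b.2 < -a.2) && decide (a.1 < b.1))) x acc) acc).Pairwise
        (fun a b : String × Int => b.2 ≤ a.2) := by
    intro l
    induction l with
    | nil => intro acc h; simpa using h
    | cons x xs ih =>
      intro acc h
      simp only [List.foldl_cons]
      refine ih _ ?_
      refine pvInsertByPairwise (fun a b : String × Int => b.2 ≤ a.2) _ (fun a b c hab hbc => le_trans hbc hab) ?_ ?_ x acc h
      · intro a b hb
        simp only [Bool.or_eq_true, Bool.and_eq_true, decide_eq_true_eq, Bool.not_eq_true',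
          decide_eq_false_iff_not] at hb
        rcases hb with h' | ⟨h', _⟩ <;> omega
      · intro a b hb
        simp only [Bool.or_eq_false_iff, Bool.and_eq_false_iff, decide_eq_false_iff_not] at hb
        omega
  simpa [PySem.List.sorted2] using key xs [] (by simp)

-- the strictly-greater count over the sorted list equals the count over the original list
theorem pvCgPerm (scores : List (String × Int)) (s : Int) :
    pvCg (PySem.List.sorted2 scores (fun x => -x.2) (fun x => x.1)) s = pvCg scores s := by
  unfold pvCg
  congr 1
  exact ((PySem.List.sorted2_perm scores (fun x => -x.2) (fun x => x.1) false).filter _).length_eq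

-- loop invariant relating A's sequential rank to the closed-form count:
-- c = consumed prefix of the sorted list, prev = score of its last element,
-- r = the rank A assigned to that element = 1 + (# strictly greater in the whole list)
def pvInv (c l : List (String × Int)) (r : Int) : Option Int → Prop
  | none => c = []
  | some p => (∀ x ∈ c, p ≤ x.2) ∧ (∀ x ∈ l, x.2 ≤ p) ∧ r = 1 + pvCg (c ++ l) p

theorem pvCgZero (l : List (String × Int)) (s : Int) (h : ∀ x ∈ l, x.2 ≤ s) :
    pvCg l s = 0 := by
  unfold pvCg
  have : l.filter (fun x => decide (s < x.2)) = [] := by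
    rw [List.filter_eq_nil_iff]
    intro x hx
    simpa using not_lt.mpr (h x hx)
  simp [this]

theorem pvCgFull (c : List (String × Int)) (s : Int) (h : ∀ x ∈ c, s < x.2) :
    pvCg c s = (c.length : Int) := by
  unfold pvCg
  have : c.filter (fun x => decide (s < x.2)) = c :=
    List.filter_eq_self.mpr (fun x hx => by simpa using h x hx)
  rw [this]

theorem pvCgAppend (c l : List (String × Int)) (s : Int) :
    pvCg (c ++ l) s = pvCg c s + pvCg l s := by
  unfold pvCg
  rw [List.filter_append, List.length_append]
  push_cast
  ring

-- the heart: A's state machine over a score-nonincreasing list emits exactly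
-- B's closed-form lines
set_option maxHeartbeats 2000000 in
theorem pvMain : ∀ (l c : List (String × Int)) (r : Int) (prev : Option Int),
    l.Pairwise (fun a b : String × Int => b.2 ≤ a.2) →
    pvInv c l r prev →
    pvLinA l ((c.length : Int) + 1) r prev
      = l.map (fun ts => pvLine (1 + pvCg (c ++ l) ts.2) ts.1 ts.2) := by
  intro l
  induction l with
  | nil => intro c r prev _ _; simp [pvLinA]
  | cons x xs ih =>
    intro c r prev hpw hinv
    obtain ⟨t, s⟩ := x
    rw [List.pairwise_cons] at hpw
    obtain ⟨hhd, htl⟩ := hpw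
    have hxs : ∀ x ∈ xs, x.2 ≤ s := fun x hx => hhd x hx
    cases prev with
    | none =>
      have hcnil : c = [] := hinv
      subst hcnil
      have hz : pvCg ((t, s) :: xs) s = 0 := by
        refine pvCgZero _ _ ?_
        intro x hx
        rcases List.mem_cons.mp hx with h | h
        · simp [h]
        · exact hxs x h
      have hinv' : pvInv [(t, s)] xs 1 (some s) := by
        refine ⟨by intro x hx; simp at hx; simp [hx], hxs, ?_⟩
        rw [List.singleton_append, hz]; ring
      have h2 := ih [(t, s)] 1 (some s) htl hinv'
      simp only [List.length_cons, List.length_nil, List.singleton_append] at h2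
      push_cast at h2
      simp only [pvLinA, if_pos (show some s ≠ (none : Option Int) by simp), List.nil_append,
        List.map_cons]
      norm_num
      refine ⟨by rw [hz]; norm_num, ?_⟩
      exact h2
    | some p =>
      obtain ⟨hc, hl, hr⟩ := hinv
      have hsp : s ≤ p := hl (t, s) List.mem_cons_self
      by_cases hse : s = p
      · -- tie: rank stays r, and r = 1 + count of strictly greater
        subst hse
        simp only [pvLinA, if_neg (show ¬ some s ≠ some s by simp)]
        have hinv' : pvInv (c ++ [(t, s)]) xs r (some s) := by
          refine ⟨?_, hxs, ?_⟩
          · intro x hx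
            rcases List.mem_append.mp hx with h | h
            · exact hc x h
            · simp at h; simp [h]
          · rw [List.append_assoc, List.singleton_append]; exact hr
        have h2 := ih (c ++ [(t, s)]) r (some s) htl hinv'
        simp only [List.length_append, List.length_cons, List.length_nil,
          List.append_assoc, List.singleton_append] at h2
        push_cast at h2
        rw [List.map_cons, h2]
        congr 1
        rw [hr]
      · -- new score: rank = index = 1 + count of strictly greater
        have hslt : s < p := lt_of_le_of_ne hsp hse
        have hne : some s ≠ some p := fun h => hse (Option.some.inj h)
        have hcnt : pvCg (c ++ (t, s) :: xs) s = (c.length : Int) := by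
          rw [pvCgAppend]
          have h1 : pvCg c s = (c.length : Int) :=
            pvCgFull c s (fun x hx => lt_of_lt_of_le hslt (hc x hx))
          have h2 : pvCg ((t, s) :: xs) s = 0 := by
            refine pvCgZero _ _ ?_
            intro x hx
            rcases List.mem_cons.mp hx with h | h
            · simp [h]
            · exact hxs x h
          rw [h1, h2]; ring
        simp only [pvLinA, if_pos hne]
        have hinv' : pvInv (c ++ [(t, s)]) xs ((c.length : Int) + 1) (some s) := by
          refine ⟨?_, hxs, ?_⟩
          · intro x hx
            rcases List.mem_append.mp hx with h | h
            · exact le_of_lt (lt_of_lt_of_le hslt (hc x h))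
            · simp at h; simp [h]
          · rw [List.append_assoc, List.singleton_append, hcnt]; ring
        have h2 := ih (c ++ [(t, s)]) ((c.length : Int) + 1) (some s) htl hinv'
        simp only [List.length_append, List.length_cons, List.length_nil,
          List.append_assoc, List.singleton_append] at h2
        push_cast at h2
        rw [List.map_cons, h2]
        congr 1
        rw [hcnt]
        ring_nf

-- ===== VERDICT (by name: the statement is the Claim_ definition above) =====
theorem create_league_ranking_spec : Claim_equal_create_league_ranking := by
  unfold Claim_equal_create_league_ranking
  intro scores _ _
  unfold Spec_create_league_ranking create_league_ranking create_league_ranking_alt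
  simp only [pvFoldA, List.nil_append]
  congr 1
  have hmain := pvMain (PySem.List.sorted2 scores (fun x => -x.2) (fun x => x.1)) [] 0 none
    (pvSortedPairwise scores) rfl
  simp only [List.length_nil, List.nil_append] at hmain
  push_cast at hmain
  rw [hmain]
  apply List.map_congr_left
  intro ts _
  rw [pvCgPerm]
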